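-- pv_equiv track=rewrite | github.com/locate918/capstone | backend/src/scraper/scraperExtractors/festivalExtractors.py | _zoo_categories
-- ===== SOURCE A (Python) =====
-- def _zoo_categories(title: str, desc: str) -> list[str]:
--     t = (title + ' ' + desc).lower()
--     cats = ['Family', 'Animals & Nature']
--     if any(w in t for w in ['run', '5k', '10k', 'race', 'walk']):
--         cats = ['Sports', 'Outdoor', 'Family']
--     elif any(w in t for w in ['halloween', 'spooky', 'goblin', 'pirates', 'princess']):
--         cats = ['Family', 'Festival', 'Entertainment']
--     elif any(w in t for w in ['santa', 'holiday', 'christmas', 'sweets']):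
--         cats = ['Family', 'Holiday', 'Entertainment']
--     elif any(w in t for w in ['after hours', 'adults only', 'adult', 'beer', 'tap', 'drink', 'nights']):
--         cats = ['Adults Only', 'Entertainment', 'Nightlife']
--     elif any(w in t for w in ['fundrais', 'gala', 'waltz', 'conservation on tap']):
--         cats = ['Fundraiser', 'Community', 'Entertainment']
--     elif any(w in t for w in ['earth', 'conservation', 'wildlife', 'nature']):
--         cats = ['Family', 'Education', 'Animals & Nature']
--     elif any(w in t for w in ['lantern', 'light', 'illuminate', 'glow']):
--         cats = ['Family', 'Festival', 'Entertainment']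
--     return cats
-- ===== SOURCE B (Python) =====
-- _KEYWORD_PRIORITY = [
--     ('run', 0), ('5k', 0), ('10k', 0), ('race', 0), ('walk', 0),
--     ('halloween', 1), ('spooky', 1), ('goblin', 1), ('pirates', 1), ('princess', 1),
--     ('santa', 2), ('holiday', 2), ('christmas', 2), ('sweets', 2),
--     ('after hours', 3), ('adults only', 3), ('adult', 3), ('beer', 3), ('tap', 3), ('drink', 3), ('nights', 3),
--     ('fundrais', 4), ('gala', 4), ('waltz', 4), ('conservation on tap', 4),
--     ('earth', 5), ('conservation', 5), ('wildlife', 5), ('nature', 5),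
--     ('lantern', 6), ('light', 6), ('illuminate', 6), ('glow', 6),
-- ]
--
-- _CATS = [
--     ['Sports', 'Outdoor', 'Family'],
--     ['Family', 'Festival', 'Entertainment'],
--     ['Family', 'Holiday', 'Entertainment'],
--     ['Adults Only', 'Entertainment', 'Nightlife'],
--     ['Fundraiser', 'Community', 'Entertainment'],
--     ['Family', 'Education', 'Animals & Nature'],
--     ['Family', 'Festival', 'Entertainment'],
-- ]
--
--
-- def _zoo_categories(title: str, desc: str) -> list[str]:
--     # Scan ALL keywords once, keep the minimum priority among matches;
--     # the minimum priority equals the first branch of the original chain that fires.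
--     t = (title + ' ' + desc).lower()
--     best = None
--     for kw, pri in _KEYWORD_PRIORITY:
--         if kw in t and (best is None or pri < best):
--             best = pri
--     if best is None:
--         return ['Family', 'Animals & Nature']
--     return list(_CATS[best])
-- ===== Notes on version B (the rewrite author's own statement) =====
-- stated objective: alternative
-- what changed: Instead of an if/elif chain testing keyword groups until the first hit, B flattens all keywords into one (keyword, priority) list, scans it once keeping the minimum matched priority, and indexes a category table with it (default when nothing matched).
import Mathlib
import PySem

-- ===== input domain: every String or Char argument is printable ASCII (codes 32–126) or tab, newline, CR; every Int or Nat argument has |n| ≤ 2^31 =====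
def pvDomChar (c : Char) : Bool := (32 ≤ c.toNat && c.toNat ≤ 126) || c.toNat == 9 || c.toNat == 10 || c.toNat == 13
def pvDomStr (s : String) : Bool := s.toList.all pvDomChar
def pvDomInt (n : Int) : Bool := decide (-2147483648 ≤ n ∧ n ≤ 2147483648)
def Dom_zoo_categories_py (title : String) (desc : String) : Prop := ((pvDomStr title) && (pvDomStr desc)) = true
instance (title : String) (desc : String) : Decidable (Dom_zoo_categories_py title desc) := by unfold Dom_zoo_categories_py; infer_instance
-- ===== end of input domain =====

-- B replaces A's first-match if/elif chain by one scan over a flat (keyword, priority) list keeping the minimum matched priority (objective: alternative).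

-- ===== PORT A =====
-- literal port of A: t = (title + ' ' + desc).lower(), then the elif chain in order
def zoo_categories_py (title : String) (desc : String) : List String :=
  let t : List Char := PySem.Chars.lower (title.toList ++ ' ' :: desc.toList)
  let cats := ["Family", "Animals & Nature"]
  if ["run", "5k", "10k", "race", "walk"].any (fun w => PySem.Chars.isIn w.toList t) then
    ["Sports", "Outdoor", "Family"]
  else if ["halloween", "spooky", "goblin", "pirates", "princess"].any (fun w => PySem.Chars.isIn w.toList t) then
    ["Family", "Festival", "Entertainment"]
  else if ["santa", "holiday", "christmas", "sweets"].any (fun w => PySem.Chars.isIn w.toList t) then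
    ["Family", "Holiday", "Entertainment"]
  else if ["after hours", "adults only", "adult", "beer", "tap", "drink", "nights"].any (fun w => PySem.Chars.isIn w.toList t) then
    ["Adults Only", "Entertainment", "Nightlife"]
  else if ["fundrais", "gala", "waltz", "conservation on tap"].any (fun w => PySem.Chars.isIn w.toList t) then
    ["Fundraiser", "Community", "Entertainment"]
  else if ["earth", "conservation", "wildlife", "nature"].any (fun w => PySem.Chars.isIn w.toList t) then
    ["Family", "Education", "Animals & Nature"]
  else if ["lantern", "light", "illuminate", "glow"].any (fun w => PySem.Chars.isIn w.toList t) then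
    ["Family", "Festival", "Entertainment"]
  else cats

-- ===== PORT B =====
-- Source B's flat keyword→priority list
def zooKw : List (String × Nat) :=
  [ ("run", 0), ("5k", 0), ("10k", 0), ("race", 0), ("walk", 0),
    ("halloween", 1), ("spooky", 1), ("goblin", 1), ("pirates", 1), ("princess", 1),
    ("santa", 2), ("holiday", 2), ("christmas", 2), ("sweets", 2),
    ("after hours", 3), ("adults only", 3), ("adult", 3), ("beer", 3), ("tap", 3), ("drink", 3), ("nights", 3),
    ("fundrais", 4), ("gala", 4), ("waltz", 4), ("conservation on tap", 4),
    ("earth", 5), ("conservation", 5), ("wildlife", 5), ("nature", 5),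
    ("lantern", 6), ("light", 6), ("illuminate", 6), ("glow", 6) ]

-- Source B's category table, indexed by priority
def zooCats : List (List String) :=
  [ ["Sports", "Outdoor", "Family"],
    ["Family", "Festival", "Entertainment"],
    ["Family", "Holiday", "Entertainment"],
    ["Adults Only", "Entertainment", "Nightlife"],
    ["Fundraiser", "Community", "Entertainment"],
    ["Family", "Education", "Animals & Nature"],
    ["Family", "Festival", "Entertainment"] ]

-- the loop body: update best if kw in t and (best is None or pri < best)
def zooStep (t : List Char) (best : Option Nat) (e : String × Nat) : Option Nat :=
  if PySem.Chars.isIn e.1.toList t && (match best with | none => true | some b => decide (e.2 < b)) then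
    some e.2
  else best

-- Source B: single scan keeping the minimum matched priority, then table lookup
-- (CATS[best] with best ∈ [0,6] always in range, so getD is exact here)
def zoo_categories_py_alt (title : String) (desc : String) : List String :=
  let t : List Char := PySem.Chars.lower (title.toList ++ ' ' :: desc.toList)
  match zooKw.foldl (zooStep t) none with
  | some b => zooCats.getD b []
  | none => ["Family", "Animals & Nature"]

-- ===== PRECONDITION & SPEC =====
def Spec_zoo_categories_py (title : String) (desc : String) (out : List String) : Prop := out = zoo_categories_py_alt title desc
instance (title : String) (desc : String) (out : List String) : Decidable (Spec_zoo_categories_py title desc out) := by unfold Spec_zoo_categories_py; infer_instance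

-- ===== CLAIM =====
def Claim_equal_zoo_categories_py : Prop := ∀ (title : String) (desc : String), Dom_zoo_categories_py title desc → Spec_zoo_categories_py title desc (zoo_categories_py title desc)

-- ===== LEMMAS AND PROOFS =====

-- merging a new priority into the running minimum
def zooMinN (acc : Option Nat) (p : Nat) : Option Nat :=
  match acc with
  | none => some p
  | some b => some (min b p)

theorem zooStep_fold_group (t : List Char) (p : Nat) (kws : List String) (acc : Option Nat) :
    ((kws.map (fun w => (w, p))).foldl (zooStep t) acc) =
      if kws.any (fun w => PySem.Chars.isIn w.toList t) then zooMinN acc p else acc := by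
  induction kws generalizing acc with
  | nil => simp
  | cons k ks ih =>
    simp only [List.map, List.foldl, List.any_cons, ih]
    rcases Bool.dichotomy (PySem.Chars.isIn k.toList t) with h | h
    · simp only [h, Bool.false_or]
      have : zooStep t acc (k, p) = acc := by
        simp [zooStep, h]
      rw [this]
    · simp only [h, Bool.true_or]
      have hs : zooStep t acc (k, p) = zooMinN acc p := by
        cases acc with
        | none => simp [zooStep, zooMinN, h]
        | some b =>
          simp only [zooStep, zooMinN, h, Bool.true_and]
          rcases Nat.lt_or_ge p b with hb | hb
          · simp [hb, Nat.min_eq_right (Nat.le_of_lt hb)]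
          · simp [Nat.not_lt.mpr hb, Nat.min_eq_left hb]
      rw [hs]
      split
      · cases acc <;> simp [zooMinN]
      · rfl

-- zooKw is the concatenation of the seven keyword groups with constant priorities
theorem zooKw_groups :
    zooKw =
      (["run", "5k", "10k", "race", "walk"].map (fun w => (w, 0))) ++
      (["halloween", "spooky", "goblin", "pirates", "princess"].map (fun w => (w, 1))) ++
      (["santa", "holiday", "christmas", "sweets"].map (fun w => (w, 2))) ++
      (["after hours", "adults only", "adult", "beer", "tap", "drink", "nights"].map (fun w => (w, 3))) ++
      (["fundrais", "gala", "waltz", "conservation on tap"].map (fun w => (w, 4))) ++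
      (["earth", "conservation", "wildlife", "nature"].map (fun w => (w, 5))) ++
      (["lantern", "light", "illuminate", "glow"].map (fun w => (w, 6))) := by
  rfl

-- ===== VERDICT =====
theorem zoo_categories_py_spec : Claim_equal_zoo_categories_py := by
  intro title desc _
  unfold Spec_zoo_categories_py zoo_categories_py zoo_categories_py_alt
  set t : List Char := PySem.Chars.lower (title.toList ++ ' ' :: desc.toList) with ht
  rw [zooKw_groups]
  simp only [List.foldl_append, zooStep_fold_group]
  rcases Bool.dichotomy (["run", "5k", "10k", "race", "walk"].any (fun w => PySem.Chars.isIn w.toList t)) with h1 | h1 <;>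
  rcases Bool.dichotomy (["halloween", "spooky", "goblin", "pirates", "princess"].any (fun w => PySem.Chars.isIn w.toList t)) with h2 | h2 <;>
  rcases Bool.dichotomy (["santa", "holiday", "christmas", "sweets"].any (fun w => PySem.Chars.isIn w.toList t)) with h3 | h3 <;>
  rcases Bool.dichotomy (["after hours", "adults only", "adult", "beer", "tap", "drink", "nights"].any (fun w => PySem.Chars.isIn w.toList t)) with h4 | h4 <;>
  rcases Bool.dichotomy (["fundrais", "gala", "waltz", "conservation on tap"].any (fun w => PySem.Chars.isIn w.toList t)) with h5 | h5 <;>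
  rcases Bool.dichotomy (["earth", "conservation", "wildlife", "nature"].any (fun w => PySem.Chars.isIn w.toList t)) with h6 | h6 <;>
  rcases Bool.dichotomy (["lantern", "light", "illuminate", "glow"].any (fun w => PySem.Chars.isIn w.toList t)) with h7 | h7 <;>
  simp [h1, h2, h3, h4, h5, h6, h7, zooMinN, zooCats]
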